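-- pv_equiv track=rewrite | github.com/LinaC404/silly-guy-try-Leetcode | Daily attendance/1728. Cat and Mouse II.py | canMouseWin
-- ===== SOURCE A (Python) =====
-- from functools import lru_cache
--
-- def canMouseWin(grid, catJump, mouseJump):
--     """
--     :type grid: List[str]
--     :type catJump: int
--     :type mouseJump: int
--     :rtype: bool
--     https://www.youtube.com/watch?v=X-a1waxZM-Q
--     """
--     # find the postion of cat, mouse, food
--     for i in range(len(grid)):
--         for j in range(len(grid[0])):
--             if grid[i][j] == 'C':
--                 cat = (i,j)
--             elif grid[i][j] == 'M':
--                 mouse = (i,j)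
--             elif grid[i][j] == 'F':
--                 food = (i,j)
--     m = len(grid)
--     n = len(grid[0])
--     direction = [(0,-1),(-1,0),(0,1),(1,0)]
--
--     @lru_cache(None)
--     def dp(cat,mouse,step):
--         # exit conditions
--         # mouse win -> return true
--         # cat win: -> return false
--         if cat==mouse:
--             return False
--         if cat == food:
--             return False
--         #  1000 cause TLE.
--         #  If who returns the visited grid[][] which means deadlock...
--         if step==m*n*2:
--             return False
--         if mouse==food:
--             return True
--
--         # Mouse first and do not forget the block
--         if step%2 == 0:
--             for i,j in direction:
--                 for jump in range(0,mouseJump+1):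
--                     ni,nj = mouse[0]+i*jump ,mouse[1]+j*jump
--                     if 0<=ni<m and 0<=nj<n and grid[ni][nj]!='#':
--                         if dp(cat,(ni,nj),step+1):
--                             return True
--                     else:
--                         break
--
--             return False
--         else:
--             for i,j in direction:
--                 for jump in range(0,catJump+1):
--                     ni,nj = cat[0]+i*jump ,cat[1]+j*jump
--                     if 0<=ni<m and 0<=nj<n and grid[ni][nj]!='#':
--                         if not dp((ni,nj),mouse,step+1):
--                             return False
--                     else:
--                         break
--             return True
--
--     return dp(cat,mouse,0)
-- ===== SOURCE B (Python) =====
-- def canMouseWin(grid, catJump, mouseJump):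
--     m, n = len(grid), len(grid[0])
--     pos = {}
--     for r, row in enumerate(grid):
--         for c, ch in enumerate(row[:n]):
--             pos[ch] = (r, c)
--     cat, mouse, food = pos['C'], pos['M'], pos['F']
--
--     def ok(p):
--         return 0 <= p[0] < m and 0 <= p[1] < n and grid[p[0]][p[1]] != '#'
--
--     def reach(pos, jmax):
--         out = []
--         for di, dj in ((0, -1), (-1, 0), (0, 1), (1, 0)):
--             for k in range(jmax + 1):
--                 p = (pos[0] + di * k, pos[1] + dj * k)
--                 if not ok(p):
--                     break
--                 out.append(p)
--         return out
--
--     free = [(i, j) for i in range(m) for j in range(n) if grid[i][j] != '#']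
--     pairs = [(c, mo) for c in free for mo in free]
--
--     wins = set()  # layer step = m*n*2: the cutoff, mouse never wins there
--     for step in range(m * n * 2 - 1, -1, -1):
--         if step % 2 == 0:
--             wins = {(c, mo) for (c, mo) in pairs
--                     if c != mo and c != food and
--                        (mo == food or any((c, p) in wins for p in reach(mo, mouseJump)))}
--         else:
--             wins = {(c, mo) for (c, mo) in pairs
--                     if c != mo and c != food and
--                        (mo == food or all((p, mo) in wins for p in reach(c, catJump)))}
--     return (cat, mouse) in wins
-- ===== Notes on version B (the rewrite author's own statement) =====
-- stated objective: alternative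
-- what changed: Replaces the lru_cache top-down minimax recursion by a bottom-up iteration that carries one set of winning (cat, mouse) pairs per step layer from the m*n*2 cutoff down to step 0, rebuilding each layer by filtering all free-cell pairs against the previous layer's set, with positions found via a dict filled by enumerating rows and moves generated as the valid prefix of each direction's candidate ray.
import Mathlib
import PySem

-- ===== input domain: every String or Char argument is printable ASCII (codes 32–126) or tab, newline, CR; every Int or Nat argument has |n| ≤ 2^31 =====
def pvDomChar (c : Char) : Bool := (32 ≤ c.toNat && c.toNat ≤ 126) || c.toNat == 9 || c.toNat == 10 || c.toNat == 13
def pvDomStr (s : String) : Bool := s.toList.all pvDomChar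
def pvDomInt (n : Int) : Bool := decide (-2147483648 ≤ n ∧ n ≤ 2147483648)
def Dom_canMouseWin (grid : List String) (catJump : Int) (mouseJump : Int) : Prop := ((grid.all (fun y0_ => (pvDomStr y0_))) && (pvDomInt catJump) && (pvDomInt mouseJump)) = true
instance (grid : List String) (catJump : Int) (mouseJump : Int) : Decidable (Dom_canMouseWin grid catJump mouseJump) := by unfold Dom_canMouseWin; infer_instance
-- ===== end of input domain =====

-- B replaces A's lru_cache minimax recursion by a bottom-up iteration that carries one
-- SET of winning (cat, mouse) pairs per step layer, rebuilt by a filter over all pairs,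
-- with moves generated as the valid prefix (takeWhile) of each direction's candidate
-- ray; objective: alternative decomposition, not speed.

-- ===== PORT A =====
-- grid[ni][nj], only ever evaluated by A after (or under) its own bounds check; the
-- '?' defaults are unreachable under Pre_ (all rows have length ≥ len(grid[0])).
def cellA (grid : List String) (i j : Int) : Char :=
  match PySem.List.pyGet? grid i with
  | some row => (PySem.Str.pyGet? row j).getD '?'
  | none => '?'

-- the position-finding double loop of A (last occurrence of each of 'C','M','F' wins)
def scanA (grid : List String) (m n : Int) :
    Option (Int × Int) × Option (Int × Int) × Option (Int × Int) :=
  (PySem.List.pyRange 0 m 1).foldl (fun acc i =>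
    (PySem.List.pyRange 0 n 1).foldl (fun acc j =>
      if cellA grid i j = 'C' then (some (i, j), acc.2.1, acc.2.2)
      else if cellA grid i j = 'M' then (acc.1, some (i, j), acc.2.2)
      else if cellA grid i j = 'F' then (acc.1, acc.2.1, some (i, j))
      else acc) acc) (none, none, none)

-- one direction of A's inner jump loop: jumps jump, jump+1, … breaking at the first
-- out-of-bounds or '#' cell; fuel = number of remaining values of range(0, jmax+1)
def rayA (grid : List String) (m n : Int) (pos d : Int × Int) :
    Nat → Int → List (Int × Int)
  | 0, _ => []
  | Nat.succ k, jump =>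
    if 0 ≤ pos.1 + d.1 * jump ∧ pos.1 + d.1 * jump < m ∧
        0 ≤ pos.2 + d.2 * jump ∧ pos.2 + d.2 * jump < n ∧
        cellA grid (pos.1 + d.1 * jump) (pos.2 + d.2 * jump) ≠ '#' then
      (pos.1 + d.1 * jump, pos.2 + d.2 * jump) :: rayA grid m n pos d k (jump + 1)
    else []

-- the cells A's nested for-loops visit (direction by direction, in order)
def movesA (grid : List String) (m n : Int) (pos : Int × Int) (jmax : Int) :
    List (Int × Int) :=
  [((0 : Int), (-1 : Int)), (-1, 0), (0, 1), (1, 0)].flatMap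
    (fun d => rayA grid m n pos d (jmax + 1).toNat 0)

-- the lru_cache of A's dp, keyed by its arguments: (cat, mouse) plus fuel = m*n*2 - step
-- and mouseTurn = (step % 2 == 0), which together carry exactly step's information
abbrev PVMemo := Std.HashMap (((Int × Int) × (Int × Int)) × Nat × Bool) Bool

-- A's 'for ...: if dp(...): return True / return False' loop, threading the cache
def anyGo (rec : Int × Int → PVMemo → Bool × PVMemo) :
    List (Int × Int) → PVMemo → Bool × PVMemo
  | [], memo => (false, memo)
  | p :: rest, memo =>
    let (r, memo') := rec p memo
    if r then (true, memo') else anyGo rec rest memo'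

-- A's 'for ...: if not dp(...): return False / return True' loop, threading the cache
def allGo (rec : Int × Int → PVMemo → Bool × PVMemo) :
    List (Int × Int) → PVMemo → Bool × PVMemo
  | [], memo => (true, memo)
  | p :: rest, memo =>
    let (r, memo') := rec p memo
    if r then allGo rec rest memo' else (false, memo')

-- A's @lru_cache dp(cat, mouse, step): check the cache, else compute and store
def dpAM (grid : List String) (m n : Int) (food : Int × Int) (cj mj : Int) :
    Nat → Bool → Int × Int → Int × Int → PVMemo → Bool × PVMemo
  | fuel, mt, cat, mouse, memo =>
    match memo.get? ((cat, mouse), fuel, mt) with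
    | some b => (b, memo)
    | none =>
      let (r, memo1) :=
        if cat = mouse then (false, memo)
        else if cat = food then (false, memo)
        else
          match fuel with
          | 0 => (false, memo)
          | Nat.succ f =>
            if mouse = food then (true, memo)
            else if mt then
              anyGo (fun p mm => dpAM grid m n food cj mj f false cat p mm)
                (movesA grid m n mouse mj) memo
            else
              allGo (fun p mm => dpAM grid m n food cj mj f true p mouse mm)
                (movesA grid m n cat cj) memo
      (r, memo1.insert ((cat, mouse), fuel, mt) r)

def canMouseWin (grid : List String) (catJump : Int) (mouseJump : Int) : Bool :=
  match PySem.List.pyGet? grid 0 with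
  | none => false          -- Python: IndexError on len(grid[0]); excluded by Pre_
  | some row0 =>
    let m : Int := grid.length
    let n : Int := PySem.Str.len row0
    match scanA grid m n with
    | (some cat, some mouse, some food) =>
        (dpAM grid m n food catJump mouseJump (m * n * 2).toNat true cat mouse
          (∅ : PVMemo)).1
    | _ => false           -- Python: NameError (no C/M/F found); excluded by Pre_

-- ===== PORT B =====
-- grid[p[0]][p[1]], read by B's ok() only under its own bounds check
def cellB (grid : List String) (i j : Int) : Char :=
  ((PySem.List.pyGet? grid i).bind (fun row => PySem.Str.pyGet? row j)).getD '?'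

-- B's position scan: one dict keyed by cell character, filled by enumerating the
-- rows and the characters of row[:n]; the last write wins
def scanB (grid : List String) (n : Int) : PySem.Dict Char (Int × Int) :=
  (PySem.List.enumerate grid).foldl (fun d ri =>
    (PySem.List.enumerate (PySem.List.slice ri.2.toList none (some n))).foldl
      (fun d cc => d.insert cc.2 (ri.1, cc.1)) d) PySem.Dict.empty

-- B's ok(p)
def okB (grid : List String) (m n : Int) (p : Int × Int) : Bool :=
  decide (0 ≤ p.1 ∧ p.1 < m ∧ 0 ≤ p.2 ∧ p.2 < n) && (cellB grid p.1 p.2 != '#')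

-- B's reach: per direction, the for-with-break over range(jmax+1) keeps exactly the
-- longest valid prefix of the candidate ray — takeWhile (exact for that loop shape)
def reachB (grid : List String) (m n : Int) (pos : Int × Int) (jmax : Int) :
    List (Int × Int) :=
  [((0 : Int), (-1 : Int)), (-1, 0), (0, 1), (1, 0)].flatMap (fun d =>
    ((PySem.List.pyRange 0 (jmax + 1) 1).map
        (fun k => (pos.1 + d.1 * k, pos.2 + d.2 * k))).takeWhile (okB grid m n))

-- free = [(i,j) for i in range(m) for j in range(n) if grid[i][j] != '#']
def freeB (grid : List String) (m n : Int) : List (Int × Int) :=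
  (PySem.List.pyRange 0 m 1).flatMap (fun i =>
    ((PySem.List.pyRange 0 n 1).filter (fun j => cellB grid i j ≠ '#')).map
      (fun j => (i, j)))

-- pairs = [(c, mo) for c in free for mo in free]
def pairsB (free : List (Int × Int)) : List ((Int × Int) × (Int × Int)) :=
  free.flatMap (fun c => free.map (fun mo => (c, mo)))

-- one iteration of B's step loop: the new set of winning (cat, mouse) pairs,
-- a set comprehension filtering all pairs against the previous layer's set
def layerB (grid : List String) (m n : Int) (food : Int × Int) (cj mj : Int)
    (pairs : List ((Int × Int) × (Int × Int))) (step : Int)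
    (w : PySem.Set ((Int × Int) × (Int × Int))) :
    PySem.Set ((Int × Int) × (Int × Int)) :=
  if PySem.Int.mod step 2 = 0 then
    PySem.Set.ofList (pairs.filter (fun p =>
      p.1 != p.2 && p.1 != food &&
        (p.2 == food ||
          (reachB grid m n p.2 mj).any (fun q => PySem.Set.contains w (p.1, q)))))
  else
    PySem.Set.ofList (pairs.filter (fun p =>
      p.1 != p.2 && p.1 != food &&
        (p.2 == food ||
          (reachB grid m n p.1 cj).all (fun q => PySem.Set.contains w (q, p.2)))))

-- 'for step in range(m*n*2 - 1, -1, -1)': fuel k+1 means the next step value is k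
def loopB (grid : List String) (m n : Int) (food : Int × Int) (cj mj : Int)
    (pairs : List ((Int × Int) × (Int × Int))) :
    Nat → PySem.Set ((Int × Int) × (Int × Int)) → PySem.Set ((Int × Int) × (Int × Int))
  | 0, w => w
  | Nat.succ k, w =>
    loopB grid m n food cj mj pairs k (layerB grid m n food cj mj pairs (k : Int) w)

def canMouseWin_alt (grid : List String) (catJump : Int) (mouseJump : Int) : Bool :=
  -- grid[0] : none = Python's IndexError, excluded by Pre_ (Option.elim's false arm)
  (PySem.List.pyGet? grid 0).elim false (fun row0 =>
    let m : Int := grid.length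
    let n : Int := PySem.Str.len row0
    let sc := scanB grid n
    -- pos['C'] / pos['M'] / pos['F']: none = Python's KeyError, excluded by Pre_
    -- (A raises NameError on the same inputs)
    (sc.get? 'C').elim false (fun cat =>
      (sc.get? 'M').elim false (fun mouse =>
        (sc.get? 'F').elim false (fun food =>
          let free := freeB grid m n
          let pairs := pairsB free
          let wins := loopB grid m n food catJump mouseJump pairs (m * n * 2).toNat
            PySem.Set.empty
          PySem.Set.contains wins (cat, mouse)))))

-- ===== PRECONDITION & SPEC =====
-- Pre_ excludes exactly the inputs on which Python A raises: an empty grid or a row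
-- shorter than grid[0] (IndexError), and grids whose scanned m×n region lacks one of
-- 'C', 'M', 'F' (NameError on cat/mouse/food).
def Pre_canMouseWin (grid : List String) (catJump : Int) (mouseJump : Int) : Prop :=
  grid ≠ [] ∧
  (∀ row ∈ grid, grid.headI.length ≤ row.length) ∧
  (∃ row ∈ grid, 'C' ∈ row.toList.take grid.headI.length) ∧
  (∃ row ∈ grid, 'M' ∈ row.toList.take grid.headI.length) ∧
  (∃ row ∈ grid, 'F' ∈ row.toList.take grid.headI.length)
instance (grid : List String) (catJump : Int) (mouseJump : Int) : Decidable (Pre_canMouseWin grid catJump mouseJump) := by unfold Pre_canMouseWin; infer_instance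

def pvWitness_canMouseWin : List String × Int × Int := (["C#", "MF"], 1, 1)

def Spec_canMouseWin (grid : List String) (catJump : Int) (mouseJump : Int) (out : Bool) : Prop := out = canMouseWin_alt grid catJump mouseJump
instance (grid : List String) (catJump : Int) (mouseJump : Int) (out : Bool) : Decidable (Spec_canMouseWin grid catJump mouseJump out) := by unfold Spec_canMouseWin; infer_instance

-- ===== CLAIM (what is proved, stated in full; the proofs are below) =====
def Claim_equal_canMouseWin : Prop := ∀ (grid : List String) (catJump : Int) (mouseJump : Int), Dom_canMouseWin grid catJump mouseJump → Pre_canMouseWin grid catJump mouseJump → Spec_canMouseWin grid catJump mouseJump (canMouseWin grid catJump mouseJump)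

-- ===== LEMMAS AND PROOFS =====

-- the mathematical value of A's memoized dp, by fuel
def dpA (grid : List String) (m n : Int) (food : Int × Int) (catJump mouseJump : Int) :
    Nat → Bool → Int × Int → Int × Int → Bool
  | fuel, mouseTurn, cat, mouse =>
    if cat = mouse then false
    else if cat = food then false
    else
      match fuel with
      | 0 => false
      | Nat.succ f =>
        if mouse = food then true
        else if mouseTurn then
          (movesA grid m n mouse mouseJump).any
            (fun p => dpA grid m n food catJump mouseJump f false cat p)
        else
          (movesA grid m n cat catJump).all
            (fun p => dpA grid m n food catJump mouseJump f true p mouse)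

def MemoOK (grid : List String) (m n : Int) (food : Int × Int) (cj mj : Int)
    (memo : PVMemo) : Prop :=
  ∀ cat mouse fuel mt b, memo.get? ((cat, mouse), fuel, mt) = some b →
    b = dpA grid m n food cj mj fuel mt cat mouse

theorem anyGo_spec (g : Int × Int → Bool) (P : PVMemo → Prop)
    (rec : Int × Int → PVMemo → Bool × PVMemo)
    (hrec : ∀ p memo, P memo → (rec p memo).1 = g p ∧ P (rec p memo).2) :
    ∀ (l : List (Int × Int)) (memo : PVMemo), P memo →
      (anyGo rec l memo).1 = l.any g ∧ P (anyGo rec l memo).2 := by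
  intro l
  induction l with
  | nil => intro memo hP; simpa [anyGo] using hP
  | cons p rest ih =>
    intro memo hP
    obtain ⟨h1, h2⟩ := hrec p memo hP
    simp only [anyGo]
    cases hr : rec p memo with
    | mk r memo' =>
      rw [hr] at h1 h2
      cases r with
      | true => simpa [← h1] using h2
      | false =>
        simp only [Bool.false_eq_true, if_false, List.any_cons, ← h1,
          Bool.false_or]
        exact ih memo' h2

theorem allGo_spec (g : Int × Int → Bool) (P : PVMemo → Prop)
    (rec : Int × Int → PVMemo → Bool × PVMemo)
    (hrec : ∀ p memo, P memo → (rec p memo).1 = g p ∧ P (rec p memo).2) :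
    ∀ (l : List (Int × Int)) (memo : PVMemo), P memo →
      (allGo rec l memo).1 = l.all g ∧ P (allGo rec l memo).2 := by
  intro l
  induction l with
  | nil => intro memo hP; simpa [allGo] using hP
  | cons p rest ih =>
    intro memo hP
    obtain ⟨h1, h2⟩ := hrec p memo hP
    simp only [allGo]
    cases hr : rec p memo with
    | mk r memo' =>
      rw [hr] at h1 h2
      cases r with
      | false => simpa [← h1] using h2
      | true =>
        simp only [if_true, List.all_cons, ← h1, Bool.true_and]
        exact ih memo' h2

theorem dpA_zero (grid : List String) (m n : Int) (food : Int × Int)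
    (cj mj : Int) (mt : Bool) (cat mouse : Int × Int) :
    dpA grid m n food cj mj 0 mt cat mouse = false := by
  rw [dpA]; split_ifs <;> rfl

theorem memoOK_insert {grid : List String} {m n : Int} {food : Int × Int} {cj mj : Int}
    {memo : PVMemo} (hP : MemoOK grid m n food cj mj memo)
    (cat mouse : Int × Int) (fuel : Nat) (mt : Bool) {v : Bool}
    (hv : v = dpA grid m n food cj mj fuel mt cat mouse) :
    MemoOK grid m n food cj mj (memo.insert ((cat, mouse), fuel, mt) v) := by
  intro c mo f t b hb
  rw [Std.HashMap.get?_eq_getElem?, Std.HashMap.getElem?_insert] at hb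
  by_cases he : (((cat, mouse), fuel, mt) : ((Int × Int) × (Int × Int)) × Nat × Bool) = ((c, mo), f, t)
  · rw [if_pos (by exact beq_iff_eq.mpr he)] at hb
    obtain ⟨⟨e1, e2⟩, e3, e4⟩ : (cat = c ∧ mouse = mo) ∧ fuel = f ∧ mt = t := by
      simpa [Prod.ext_iff] using he
    subst e1; subst e2; subst e3; subst e4
    cases hb; exact hv
  · rw [if_neg (by simpa using he)] at hb
    exact hP c mo f t b (by rw [Std.HashMap.get?_eq_getElem?]; exact hb)

theorem dpA_succ (grid : List String) (m n : Int) (food : Int × Int)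
    (cj mj : Int) (f : Nat) (mt : Bool) (cat mouse : Int × Int) :
    dpA grid m n food cj mj (Nat.succ f) mt cat mouse =
      (if cat = mouse then false
       else if cat = food then false
       else if mouse = food then true
       else if mt then
         (movesA grid m n mouse mj).any
           (fun p => dpA grid m n food cj mj f false cat p)
       else
         (movesA grid m n cat cj).all
           (fun p => dpA grid m n food cj mj f true p mouse)) := by
  rw [dpA]

theorem dpAM_spec (grid : List String) (m n : Int) (food : Int × Int) (cj mj : Int) :
    ∀ (fuel : Nat) (mt : Bool) (cat mouse : Int × Int) (memo : PVMemo),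
      MemoOK grid m n food cj mj memo →
      (dpAM grid m n food cj mj fuel mt cat mouse memo).1 =
        dpA grid m n food cj mj fuel mt cat mouse ∧
      MemoOK grid m n food cj mj (dpAM grid m n food cj mj fuel mt cat mouse memo).2 := by
  intro fuel
  induction fuel with
  | zero =>
    intro mt cat mouse memo hP
    rw [dpAM]
    cases hkey : memo.get? ((cat, mouse), 0, mt) with
    | some b =>
      exact ⟨(hP cat mouse 0 mt b hkey).symm ▸ rfl, hP⟩
    | none =>
      rw [dpA_zero]
      split_ifs with h1 h2 <;>
        exact ⟨rfl, memoOK_insert hP cat mouse 0 mt (dpA_zero _ _ _ _ _ _ _ _ _).symm⟩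
  | succ f ih =>
    intro mt cat mouse memo hP
    rw [dpAM]
    cases hkey : memo.get? ((cat, mouse), Nat.succ f, mt) with
    | some b =>
      exact ⟨(hP cat mouse (Nat.succ f) mt b hkey).symm ▸ rfl, hP⟩
    | none =>
      rw [dpA_succ]
      by_cases h1 : cat = mouse
      · rw [if_pos h1, if_pos h1]
        exact ⟨rfl, memoOK_insert hP cat mouse (Nat.succ f) mt
          (by rw [dpA_succ, if_pos h1])⟩
      rw [if_neg h1, if_neg h1]
      by_cases h2 : cat = food
      · rw [if_pos h2, if_pos h2]
        exact ⟨rfl, memoOK_insert hP cat mouse (Nat.succ f) mt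
          (by rw [dpA_succ, if_neg h1, if_pos h2])⟩
      rw [if_neg h2, if_neg h2]
      by_cases h3 : mouse = food
      · rw [if_pos h3, if_pos h3]
        exact ⟨rfl, memoOK_insert hP cat mouse (Nat.succ f) mt
          (by rw [dpA_succ, if_neg h1, if_neg h2, if_pos h3])⟩
      rw [if_neg h3, if_neg h3]
      cases mt with
      | true =>
        simp only [if_true]
        have hgo := anyGo_spec (fun p => dpA grid m n food cj mj f false cat p)
          (MemoOK grid m n food cj mj)
          (fun p mm => dpAM grid m n food cj mj f false cat p mm)
          (fun p memo h => ih false cat p memo h)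
          (movesA grid m n mouse mj) memo hP
        cases hgoe : anyGo (fun p mm => dpAM grid m n food cj mj f false cat p mm)
            (movesA grid m n mouse mj) memo with
        | mk r memo1 =>
          rw [hgoe] at hgo
          exact ⟨hgo.1, memoOK_insert hgo.2 cat mouse (Nat.succ f) true
            (by rw [dpA_succ, if_neg h1, if_neg h2, if_neg h3, if_pos rfl, ← hgo.1])⟩
      | false =>
        simp only [Bool.false_eq_true, if_false]
        have hgo := allGo_spec (fun p => dpA grid m n food cj mj f true p mouse)
          (MemoOK grid m n food cj mj)
          (fun p mm => dpAM grid m n food cj mj f true p mouse mm)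
          (fun p memo h => ih true p mouse memo h)
          (movesA grid m n cat cj) memo hP
        cases hgoe : allGo (fun p mm => dpAM grid m n food cj mj f true p mouse mm)
            (movesA grid m n cat cj) memo with
        | mk r memo1 =>
          rw [hgoe] at hgo
          exact ⟨hgo.1, memoOK_insert hgo.2 cat mouse (Nat.succ f) false
            (by rw [dpA_succ, if_neg h1, if_neg h2, if_neg h3]
                simp only [Bool.false_eq_true, if_false, ← hgo.1])⟩

theorem cellB_eq_cellA : cellB = cellA := by
  funext grid i j
  unfold cellB cellA
  cases PySem.List.pyGet? grid i <;> rfl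


-- B's for-with-break over one direction equals A's fueled ray recursion
theorem takeWhile_eq_rayA (grid : List String) (m n : Int) (pos d : Int × Int)
    (jmax : Int) :
    ∀ (k : Nat) (j : Int), k = (jmax + 1 - j).toNat →
      ((PySem.List.pyRange j (jmax + 1) 1).map
          (fun t => (pos.1 + d.1 * t, pos.2 + d.2 * t))).takeWhile (okB grid m n) =
        rayA grid m n pos d k j := by
  intro k
  induction k with
  | zero =>
    intro j hj
    rw [PySem.List.pyRange_one_eq_nil (by omega)]
    rfl
  | succ k ih =>
    intro j hj
    rw [PySem.List.pyRange_one_cons (by omega), List.map_cons, List.takeWhile_cons,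
      rayA]
    by_cases h : 0 ≤ pos.1 + d.1 * j ∧ pos.1 + d.1 * j < m ∧
        0 ≤ pos.2 + d.2 * j ∧ pos.2 + d.2 * j < n ∧
        cellA grid (pos.1 + d.1 * j) (pos.2 + d.2 * j) ≠ '#'
    · have hok : okB grid m n (pos.1 + d.1 * j, pos.2 + d.2 * j) = true := by
        simp only [okB, cellB_eq_cellA, Bool.and_eq_true, decide_eq_true_eq,
          bne_iff_ne, ne_eq]
        tauto
      rw [hok, if_pos h, if_pos rfl, ih (j + 1) (by omega)]
    · have hok : okB grid m n (pos.1 + d.1 * j, pos.2 + d.2 * j) = false := by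
        simp only [okB, cellB_eq_cellA, Bool.and_eq_false_iff, decide_eq_false_iff_not,
          bne_eq_false_iff_eq, not_and]
        by_cases hb : 0 ≤ pos.1 + d.1 * j ∧ pos.1 + d.1 * j < m ∧
            0 ≤ pos.2 + d.2 * j ∧ pos.2 + d.2 * j < n
        · right; tauto
        · left; tauto
      rw [hok, if_neg h]
      rfl

theorem reachB_eq_movesA (grid : List String) (m n : Int) (pos : Int × Int)
    (jmax : Int) : reachB grid m n pos jmax = movesA grid m n pos jmax := by
  unfold reachB movesA
  congr 1
  funext d
  exact takeWhile_eq_rayA grid m n pos d jmax (jmax + 1).toNat 0 (by omega)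

theorem mem_freeB (grid : List String) (m n : Int) (p : Int × Int) :
    p ∈ freeB grid m n ↔
      0 ≤ p.1 ∧ p.1 < m ∧ 0 ≤ p.2 ∧ p.2 < n ∧ cellB grid p.1 p.2 ≠ '#' := by
  obtain ⟨i, j⟩ := p
  simp [freeB, PySem.List.mem_pyRange_one, List.mem_filter]
  tauto

theorem mem_pairsB (free : List (Int × Int)) (c mo : Int × Int) :
    (c, mo) ∈ pairsB free ↔ c ∈ free ∧ mo ∈ free := by
  simp [pairsB]

theorem mem_reachB (grid : List String) (m n : Int) (pos : Int × Int) (jmax : Int)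
    (q : Int × Int) (hq : q ∈ reachB grid m n pos jmax) : q ∈ freeB grid m n := by
  simp only [reachB, List.mem_flatMap] at hq
  obtain ⟨d, _, hd⟩ := hq
  have hok := List.mem_takeWhile_imp hd
  simp only [okB, Bool.and_eq_true, decide_eq_true_eq, bne_iff_ne, ne_eq] at hok
  rw [mem_freeB]
  tauto

theorem pvFoldlInv {α β : Type} (P : β → Prop) (f : β → α → β) :
    ∀ (l : List α) (init : β), P init → (∀ b a, a ∈ l → P b → P (f b a)) →
      P (l.foldl f init) := by
  intro l
  induction l with
  | nil => intro init h _; simpa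
  | cons x l ih =>
    intro init h hs
    exact ih _ (hs init x (by simp) h) (fun b a ha hb => hs b a (by simp [ha]) hb)

theorem pvAllCongr {α : Type} (l : List α) (f g : α → Bool)
    (h : ∀ x ∈ l, f x = g x) : l.all f = l.all g := by
  induction l with
  | nil => rfl
  | cons x l ih =>
    simp only [List.all_cons, h x (by simp), ih (fun y hy => h y (by simp [hy]))]

theorem scanA_free (grid : List String) (m n : Int) (cat mouse food : Int × Int)
    (h : scanA grid m n = (some cat, some mouse, some food)) :
    cat ∈ freeB grid m n ∧ mouse ∈ freeB grid m n := by
  set P : Option (Int × Int) × Option (Int × Int) × Option (Int × Int) → Prop :=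
    fun acc => (∀ p, acc.1 = some p → p ∈ freeB grid m n) ∧
      (∀ p, acc.2.1 = some p → p ∈ freeB grid m n) ∧
      (∀ p, acc.2.2 = some p → p ∈ freeB grid m n) with hPdef
  have key : P (scanA grid m n) := by
    rw [scanA]
    apply pvFoldlInv P _ _ _ (by simp [hPdef])
    intro acc i hi hacc
    apply pvFoldlInv P _ _ _ hacc
    intro acc2 j hj hacc2
    have hi' := (PySem.List.mem_pyRange_one.mp hi)
    have hj' := (PySem.List.mem_pyRange_one.mp hj)
    have hfree : ∀ c, cellA grid i j = c → c ≠ '#' → (i, j) ∈ freeB grid m n := by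
      intro c hc hne
      exact (mem_freeB grid m n (i, j)).mpr
        ⟨hi'.1, hi'.2, hj'.1, hj'.2, by rw [cellB_eq_cellA, hc]; exact hne⟩
    split_ifs with hC hM hF
    · exact ⟨fun p hp => by cases hp; exact hfree _ hC (by decide),
        hacc2.2.1, hacc2.2.2⟩
    · exact ⟨hacc2.1, fun p hp => by cases hp; exact hfree _ hM (by decide),
        hacc2.2.2⟩
    · exact ⟨hacc2.1, hacc2.2.1,
        fun p hp => by cases hp; exact hfree _ hF (by decide)⟩
    · exact hacc2
  rw [h] at key
  exact ⟨key.1 cat rfl, key.2.1 mouse rfl⟩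

theorem pvModTwo (s : Int) : PySem.Int.mod s 2 = s % 2 := by
  simp [PySem.Int.mod, Int.fmod_eq_emod]

theorem contains_ofList_filter {α : Type} [BEq α] [LawfulBEq α]
    (l : List α) (f : α → Bool) (x : α) (hx : x ∈ l) :
    PySem.Set.contains (PySem.Set.ofList (l.filter f)) x = f x := by
  apply Bool.eq_iff_iff.mpr
  rw [PySem.Set.contains_iff, PySem.Set.mem_ofList, List.mem_filter]
  exact ⟨fun h => h.2, fun h => ⟨hx, h⟩⟩

-- generic lockstep foldl relation (used to relate A's triple scan to B's dict scan)
theorem pvFoldlRel {α β γ : Type} (R : β → γ → Prop) (f : β → α → β) (g : γ → α → γ) :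
    ∀ (l : List α) (b : β) (c : γ), R b c →
      (∀ b c a, a ∈ l → R b c → R (f b a) (g c a)) → R (l.foldl f b) (l.foldl g c) := by
  intro l
  induction l with
  | nil => intro b c h _; simpa
  | cons x l ih =>
    intro b c h hs
    exact ih _ _ (hs b c x (by simp) h) (fun b c a ha hb => hs b c a (by simp [ha]) hb)

def pvScanRel (acc : Option (Int × Int) × Option (Int × Int) × Option (Int × Int))
    (d : PySem.Dict Char (Int × Int)) : Prop :=
  d.get? 'C' = acc.1 ∧ d.get? 'M' = acc.2.1 ∧ d.get? 'F' = acc.2.2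

-- B's enumerate/slice double loop is the same cell-by-cell walk as A's index loops,
-- provided every row is at least n characters long
theorem scanB_conv (grid : List String) (n : Int) (hn : 0 ≤ n)
    (hrows : ∀ row ∈ grid, n ≤ (row.toList.length : Int)) :
    scanB grid n = (PySem.List.pyRange 0 (grid.length : Int) 1).foldl
      (fun d i => (PySem.List.pyRange 0 n 1).foldl
        (fun d j => d.insert (cellA grid i j) (i, j)) d) PySem.Dict.empty := by
  rw [scanB, PySem.List.enumerate_eq_map_pyRange grid (d := ""), List.foldl_map]
  simp only [PySem.List.len_eq]
  apply PySem.List.foldl_congr_mem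
  intro acc i hi
  obtain ⟨hi0, him⟩ := PySem.List.mem_pyRange_one.mp hi
  have hilt : i.toNat < grid.length := by omega
  have hrowD : PySem.List.pyGetD grid i "" = grid[i.toNat] :=
    PySem.List.pyGetD_eq_getElem grid "" hi0 (by simpa using him)
  have hmem : grid[i.toNat] ∈ grid := List.getElem_mem hilt
  have hlen : n ≤ ((grid[i.toNat] : String).toList.length : Int) := hrows _ hmem
  obtain ⟨nn, rfl⟩ : ∃ nn : Nat, n = (nn : Int) := ⟨n.toNat, by omega⟩
  rw [hrowD, PySem.List.slice_to_natCast,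
    PySem.List.enumerate_eq_map_pyRange ((grid[i.toNat] : String).toList.take nn)
      (d := 'x'), List.foldl_map]
  simp only [PySem.List.len_eq,
    List.length_take_of_le (by exact_mod_cast hlen : nn ≤ _)]
  apply PySem.List.foldl_congr_mem
  intro acc2 j hj
  obtain ⟨hj0, hjn⟩ := PySem.List.mem_pyRange_one.mp hj
  obtain ⟨jj, rfl⟩ : ∃ jj : Nat, j = (jj : Int) := ⟨j.toNat, by omega⟩
  have hjj : jj < nn := by omega
  have hjlen : jj < (grid[i.toNat] : String).toList.length := by omega
  have hchar : PySem.List.pyGetD ((grid[i.toNat] : String).toList.take nn) (jj : Int) 'x'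
      = cellA grid i (jj : Int) := by
    unfold cellA
    rw [PySem.List.pyGet?_eq_some_getElem grid hi0 (by simpa using him)]
    show PySem.List.pyGetD ((grid[i.toNat] : String).toList.take nn) (jj : Int) 'x' =
      (PySem.Str.pyGet? grid[i.toNat] (jj : Int)).getD '?'
    rw [PySem.Str.pyGet?_natCast]
    simp only [PySem.List.pyGetD_natCast]
    rw [List.getElem?_eq_getElem hjlen]
    rw [List.getD_eq_getElem?_getD, List.getElem?_take, if_pos hjj,
      List.getElem?_eq_getElem hjlen]
    rfl
  rw [hchar]

-- B's dict holds, at 'C'/'M'/'F', exactly the components of A's scan triple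
theorem scanB_get (grid : List String) (n : Int) (hn : 0 ≤ n)
    (hrows : ∀ row ∈ grid, n ≤ (row.toList.length : Int)) :
    pvScanRel (scanA grid (grid.length : Int) n) (scanB grid n) := by
  rw [scanB_conv grid n hn hrows, scanA]
  refine pvFoldlRel pvScanRel _ _ _ _ _ (by simp [pvScanRel]) ?_
  intro acc d i _ hR
  refine pvFoldlRel pvScanRel _ _ _ _ _ hR ?_
  intro acc d j _ hR
  obtain ⟨h1, h2, h3⟩ := hR
  unfold pvScanRel
  by_cases hC : cellA grid i j = 'C'
  · simp [hC, PySem.Dict.get?_insert, h1, h2, h3]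
  by_cases hM : cellA grid i j = 'M'
  · simp [hM, hC, PySem.Dict.get?_insert, h1, h2, h3]
  by_cases hF : cellA grid i j = 'F'
  · simp [hF, hC, hM, PySem.Dict.get?_insert, h1, h2, h3]
  · rw [if_neg hC, if_neg hM, if_neg hF]
    refine ⟨?_, ?_, ?_⟩ <;>
      rw [PySem.Dict.get?_insert] <;>
      [rw [if_neg (fun h => hC h.symm)]; rw [if_neg (fun h => hM h.symm)];
        rw [if_neg (fun h => hF h.symm)]] <;>
      [exact h1; exact h2; exact h3]

-- one layer of B's loop computes the next fuel level of A's dp on all free pairs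
theorem layer_stepB (grid : List String) (m n : Int) (food : Int × Int)
    (cj mj : Int) (T s : Int) (hsT : s < T)
    (w : PySem.Set ((Int × Int) × (Int × Int)))
    (hw : ∀ c mo, c ∈ freeB grid m n → mo ∈ freeB grid m n →
      PySem.Set.contains w (c, mo) =
        dpA grid m n food cj mj (T - (s + 1)).toNat
          (decide (PySem.Int.mod (s + 1) 2 = 0)) c mo) :
    ∀ c mo, c ∈ freeB grid m n → mo ∈ freeB grid m n →
      PySem.Set.contains
          (layerB grid m n food cj mj (pairsB (freeB grid m n)) s w) (c, mo) =
        dpA grid m n food cj mj (T - s).toNat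
          (decide (PySem.Int.mod s 2 = 0)) c mo := by
  intro c mo hc hmo
  have hfuel : (T - s).toNat = (T - (s + 1)).toNat + 1 := by omega
  rw [hfuel, dpA_succ]
  have hpair : (c, mo) ∈ pairsB (freeB grid m n) := (mem_pairsB _ c mo).mpr ⟨hc, hmo⟩
  rw [layerB]
  by_cases hm : PySem.Int.mod s 2 = 0
  · rw [if_pos hm, contains_ofList_filter _ _ _ hpair]
    by_cases h1 : c = mo
    · simp [h1]
    by_cases h2 : c = food
    · simp [h2]
    by_cases h3 : mo = food
    · simp [h2, h3]
    rw [if_neg h1, if_neg h2, if_neg h3, if_pos (by simpa using hm)]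
    have hne1 : (c != mo) = true := by simp [h1]
    have hne2 : (c != food) = true := by simp [h2]
    have hne3 : (mo == food) = false := by simp [h3]
    rw [hne1, hne2, hne3, Bool.true_and, Bool.true_and, Bool.false_or,
      reachB_eq_movesA]
    apply PySem.List.any_congr_mem
    intro q hq
    have hqF : q ∈ freeB grid m n := by
      rw [← reachB_eq_movesA] at hq
      exact mem_reachB grid m n mo mj q hq
    rw [hw c q hc hqF]
    congr 1
    rw [pvModTwo] at hm ⊢
    simp only [decide_eq_false_iff_not]
    omega
  · rw [if_neg hm, contains_ofList_filter _ _ _ hpair]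
    by_cases h1 : c = mo
    · simp [h1]
    by_cases h2 : c = food
    · simp [h2]
    by_cases h3 : mo = food
    · simp [h2, h3]
    rw [if_neg h1, if_neg h2, if_neg h3, if_neg (by simpa using hm)]
    have hne1 : (c != mo) = true := by simp [h1]
    have hne2 : (c != food) = true := by simp [h2]
    have hne3 : (mo == food) = false := by simp [h3]
    rw [hne1, hne2, hne3, Bool.true_and, Bool.true_and, Bool.false_or,
      reachB_eq_movesA]
    apply pvAllCongr
    intro q hq
    have hqF : q ∈ freeB grid m n := by
      rw [← reachB_eq_movesA] at hq
      exact mem_reachB grid m n c cj q hq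
    rw [hw q mo hqF hmo]
    congr 1
    rw [pvModTwo] at hm ⊢
    simp only [decide_eq_true_eq]
    omega

-- B's countdown loop carries the dp layers from the cutoff down to step 0
theorem loopB_inv (grid : List String) (m n : Int) (food : Int × Int)
    (cj mj : Int) (T : Int) :
    ∀ (k : Nat), (k : Int) ≤ T →
      ∀ w, (∀ c mo, c ∈ freeB grid m n → mo ∈ freeB grid m n →
        PySem.Set.contains w (c, mo) =
          dpA grid m n food cj mj (T - (k : Int)).toNat
            (decide (PySem.Int.mod (k : Int) 2 = 0)) c mo) →
      ∀ c mo, c ∈ freeB grid m n → mo ∈ freeB grid m n →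
        PySem.Set.contains
            (loopB grid m n food cj mj (pairsB (freeB grid m n)) k w) (c, mo) =
          dpA grid m n food cj mj (T - 0).toNat
            (decide (PySem.Int.mod 0 2 = 0)) c mo := by
  intro k
  induction k with
  | zero =>
    intro _ w hw c mo hc hmo
    rw [loopB]
    exact hw c mo hc hmo
  | succ k ih =>
    intro hk w hw c mo hc hmo
    rw [loopB]
    apply ih (by push_cast at hk ⊢; omega) _ _ c mo hc hmo
    intro c' mo' hc' hmo'
    apply layer_stepB grid m n food cj mj T (k : Int) (by push_cast at hk; omega) w
      _ c' mo' hc' hmo'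
    intro c'' mo'' hc'' hmo''
    have := hw c'' mo'' hc'' hmo''
    rw [this]
    norm_cast

-- ===== VERDICT (by name: the statement is the Claim_ definition above) =====
theorem canMouseWin_spec : Claim_equal_canMouseWin := by
  intro grid catJump mouseJump hDom hPre
  unfold Spec_canMouseWin
  obtain ⟨hne, hrows, -, -, -⟩ := hPre
  cases hg : PySem.List.pyGet? grid 0 with
  | none => simp only [canMouseWin, canMouseWin_alt, hg, Option.elim]
  | some row0 =>
    simp only [canMouseWin, canMouseWin_alt, hg, Option.elim]
    have hhead : grid.headI = row0 := by
      cases grid with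
      | nil => exact absurd rfl hne
      | cons a l =>
        have := PySem.List.pyGet?_zero_cons a l
        rw [this] at hg
        cases hg
        rfl
    have hrows' : ∀ row ∈ grid, PySem.Str.len row0 ≤ (row.toList.length : Int) := by
      intro row hr
      have h1 := hrows row hr
      rw [hhead] at h1
      rw [PySem.Str.len_eq]
      have h2 : row.toList.length = row.length := String.length_toList
      have h3 : row0.toList.length = row0.length := String.length_toList
      omega
    have hn0 : 0 ≤ PySem.Str.len row0 := by
      rw [PySem.Str.len_eq]
      exact Int.natCast_nonneg _
    obtain ⟨e1, e2, e3⟩ := scanB_get grid (PySem.Str.len row0) hn0 hrows'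
    rw [e1, e2, e3]
    rcases hscan : scanA grid (grid.length : Int) (PySem.Str.len row0) with ⟨o1, o2, o3⟩
    rcases o1 with _ | cat
    · rcases o2 with _ | mouse <;> rcases o3 with _ | food <;> rfl
    rcases o2 with _ | mouse
    · rcases o3 with _ | food <;> rfl
    rcases o3 with _ | food
    · rfl
    dsimp only
    have hMem0 : MemoOK grid (grid.length : Int) (PySem.Str.len row0) food
        catJump mouseJump (∅ : PVMemo) := by
      intro c mo f t b hb
      rw [Std.HashMap.get?_eq_getElem?] at hb
      simp at hb
    rw [(dpAM_spec grid _ _ food catJump mouseJump _ true cat mouse _ hMem0).1]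
    obtain ⟨hcF, hmoF⟩ := scanA_free grid _ _ cat mouse food hscan
    set T : Int := (grid.length : Int) * PySem.Str.len row0 * 2 with hTdef
    have hT : 0 ≤ T := by
      have h2 : (0 : Int) ≤ PySem.Str.len row0 := hn0
      have h1 : (0 : Int) ≤ (grid.length : Int) := Int.natCast_nonneg _
      positivity
    have hfin := loopB_inv grid (grid.length : Int) (PySem.Str.len row0) food
      catJump mouseJump T T.toNat (by omega) PySem.Set.empty
      (by
        intro c mo hc hmo
        rw [show (T - (T.toNat : Int)).toNat = 0 from by omega, dpA_zero]
        rfl)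
      cat mouse hcF hmoF
    rw [hfin]
    rw [show (T - 0).toNat = T.toNat from by omega,
      show decide (PySem.Int.mod 0 2 = 0) = true from by decide]
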